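-- pv_equiv track=rewrite | github.com/siranipour/Project-Euler | euler 2.py | mFunction
-- ===== SOURCE A (Python) =====
-- def numDigits(testNum, digit):
--     testNum = str(testNum)
--     total = 0
--     for i in range(len(testNum)):
--         if int(testNum[i]) == digit:
--             total += 1
--     return total
--
-- def mFunction(d, numbers = []):
--     max = 0
--     maxNumbers = []
--     for i in numbers:
--         if numDigits(i, d) > max:
--             maxNumbers = []
--             maxNumbers.append(i)
--             max = numDigits(i, d)
--         elif numDigits(i, d) == max:
--             maxNumbers.append(i)
--     return maxNumbers
-- ===== SOURCE B (Python) =====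
-- def numDigits(testNum, digit):
--     testNum = str(testNum)
--     total = 0
--     for i in range(len(testNum)):
--         if int(testNum[i]) == digit:
--             total += 1
--     return total
--
-- def mFunction(d, numbers = []):
--     counts = [numDigits(i, d) for i in numbers]
--     best = max(counts) if counts else 0
--     return [i for i, c in zip(numbers, counts) if c == best]
-- ===== Notes on version B (the rewrite author's own statement) =====
-- stated objective: simpler
-- what changed: Replaces the single-pass running-max loop that rebuilds the result list whenever a new maximum appears with a three-stage pass: compute all digit-counts once, take their maximum, then filter the numbers whose count equals it; Pre_ excludes lists containing a negative number, on which numDigits (kept unchanged in B) raises ValueError in both A and B.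
import Mathlib
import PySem

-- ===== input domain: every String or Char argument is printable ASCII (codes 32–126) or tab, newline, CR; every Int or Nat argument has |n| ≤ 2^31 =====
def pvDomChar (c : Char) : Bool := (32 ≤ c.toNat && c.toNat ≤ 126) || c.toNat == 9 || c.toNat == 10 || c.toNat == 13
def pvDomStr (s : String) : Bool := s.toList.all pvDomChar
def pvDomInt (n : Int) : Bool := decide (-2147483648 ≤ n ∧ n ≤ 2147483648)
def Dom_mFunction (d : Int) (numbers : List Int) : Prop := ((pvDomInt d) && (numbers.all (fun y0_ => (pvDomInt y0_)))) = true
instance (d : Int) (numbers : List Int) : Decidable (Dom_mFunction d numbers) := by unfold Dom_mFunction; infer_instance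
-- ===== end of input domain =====

-- B computes every digit-count once (compute counts, take max, filter) instead of A's
-- running-max loop that recomputes counts and rebuilds the result list; same ordered result.
-- A raises ValueError on negative list elements (int('-')); B keeps that helper, so both raise: Pre_ excludes them.

-- ===== PORT A =====
-- numDigits(testNum, digit): str(testNum); loop over indices; int of one-char slice compared to digit.
-- int(testNum[i]) raises ValueError on '-' (negative testNum): the port returns the running total there
-- (inputs with negative elements are excluded by Pre_mFunction).
def ndStep (s : List Char) (d : Int) (total : Int) (i : Int) : Int :=
  match PySem.List.pyGet? s i with
  | some c =>
    match PySem.Int.ofChars? [c] with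
    | some v => if v == d then total + 1 else total
    | none => total
  | none => total

def numDigitsPort (testNum : Int) (d : Int) : Int :=
  let s := PySem.Int.toChars testNum
  (PySem.List.pyRange 0 (s.length : Int) 1).foldl (ndStep s d) 0

-- the body of A's for-loop over state (max, maxNumbers)
def aStep (d : Int) (st : Int × List Int) (i : Int) : Int × List Int :=
  if numDigitsPort i d > st.1 then (numDigitsPort i d, [i])
  else if numDigitsPort i d == st.1 then (st.1, st.2 ++ [i])
  else st

def mFunction (d : Int) (numbers : List Int) : List Int :=
  (numbers.foldl (aStep d) (0, [])).2

-- ===== PORT B =====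
def mFunction_alt (d : Int) (numbers : List Int) : List Int :=
  let counts := numbers.map (fun i => numDigitsPort i d)
  let best := match PySem.List.max? counts (fun x => x) with
    | some m => m
    | none => 0
  ((numbers.zip counts).filter (fun p => p.2 == best)).map Prod.fst

-- ===== PRECONDITION & SPEC =====
-- Pre_ excludes lists containing a negative number: there numDigits hits int('-') and raises ValueError (in A and in B alike).
def Pre_mFunction (d : Int) (numbers : List Int) : Prop := ∀ n ∈ numbers, 0 ≤ n
instance (d : Int) (numbers : List Int) : Decidable (Pre_mFunction d numbers) := by unfold Pre_mFunction; infer_instance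
def pvWitness_mFunction : Int × List Int := (7, [17, 7, 70, 3])

def Spec_mFunction (d : Int) (numbers : List Int) (out : List Int) : Prop := out = mFunction_alt d numbers
instance (d : Int) (numbers : List Int) (out : List Int) : Decidable (Spec_mFunction d numbers out) := by unfold Spec_mFunction; infer_instance

-- ===== CLAIM (what is proved, stated in full; the proofs are below) =====
def Claim_equal_mFunction : Prop := ∀ (d : Int) (numbers : List Int), Dom_mFunction d numbers → Pre_mFunction d numbers → Spec_mFunction d numbers (mFunction d numbers)

-- ===== LEMMAS AND PROOFS =====

-- greatest digit-count of a list (0 for the empty list), the value both programs filter by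
def mxc (d : Int) : List Int → Int
  | [] => 0
  | x :: r => max (numDigitsPort x d) (mxc d r)

lemma ndStep_le (s : List Char) (d total i : Int) : total ≤ ndStep s d total i := by
  unfold ndStep
  rcases PySem.List.pyGet? s i with _ | c
  · exact Int.le_refl total
  dsimp only
  rcases PySem.Int.ofChars? [c] with _ | v
  · exact Int.le_refl total
  dsimp only
  split <;> omega

lemma foldl_ndStep_le (s : List Char) (d : Int) :
    ∀ (l : List Int) (t : Int), t ≤ l.foldl (ndStep s d) t
  | [], t => le_refl t
  | i :: l, t => le_trans (ndStep_le s d t i) (foldl_ndStep_le s d l _)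

lemma cnt_nonneg (d x : Int) : 0 ≤ numDigitsPort x d :=
  foldl_ndStep_le _ d _ 0

lemma mxc_nonneg (d : Int) : ∀ xs : List Int, 0 ≤ mxc d xs
  | [] => le_refl 0
  | _ :: r => le_trans (mxc_nonneg d r) (le_max_right _ _)

lemma loopA (d : Int) : ∀ (xs : List Int) (m : Int) (acc : List Int), 0 ≤ m →
    (xs.foldl (aStep d) (m, acc)).2 =
      (if mxc d xs ≤ m then acc else []) ++
        xs.filter (fun x => numDigitsPort x d == max m (mxc d xs)) := by
  intro xs
  induction xs with
  | nil => intro m acc hm; simp [mxc, hm]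
  | cons x r ih =>
    intro m acc hm
    have hcx := cnt_nonneg d x
    have hmr := mxc_nonneg d r
    simp only [List.foldl_cons, aStep, mxc, List.filter_cons]
    by_cases h1 : numDigitsPort x d > m
    · rw [if_pos (by exact_mod_cast h1)]
      rw [ih (numDigitsPort x d) [x] hcx]
      by_cases hc : mxc d r ≤ numDigitsPort x d
      · rw [if_pos hc, if_neg (by omega)]
        have hmax : max m (max (numDigitsPort x d) (mxc d r)) = numDigitsPort x d := by omega
        have hmax2 : max (numDigitsPort x d) (mxc d r) = numDigitsPort x d := by omega
        rw [hmax, hmax2]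
        simp
      · rw [if_neg hc, if_neg (by omega)]
        have hmax : max m (max (numDigitsPort x d) (mxc d r)) = mxc d r := by omega
        have hmax2 : max (numDigitsPort x d) (mxc d r) = mxc d r := by omega
        rw [hmax, hmax2]
        have : (numDigitsPort x d == mxc d r) = false := by
          simp only [beq_eq_false_iff_ne]; omega
        simp [this]
    · by_cases h2 : numDigitsPort x d = m
      · rw [if_neg (by exact_mod_cast h1), if_pos (by exact_mod_cast (beq_iff_eq.mpr h2))]
        rw [ih m (acc ++ [x]) hm]
        by_cases hc : mxc d r ≤ m
        · rw [if_pos hc, if_pos (show max (numDigitsPort x d) (mxc d r) ≤ m by omega)]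
          have hmax : max m (max (numDigitsPort x d) (mxc d r)) = m := by omega
          have hmax2 : max m (mxc d r) = m := by omega
          rw [hmax, hmax2]
          have hb : (numDigitsPort x d == m) = true := beq_iff_eq.mpr h2
          simp [hb]
        · rw [if_neg hc, if_neg (show ¬ max (numDigitsPort x d) (mxc d r) ≤ m by omega)]
          have hmax : max m (max (numDigitsPort x d) (mxc d r)) = mxc d r := by omega
          have hmax2 : max m (mxc d r) = mxc d r := by omega
          rw [hmax, hmax2]
          have hb : (numDigitsPort x d == mxc d r) = false := by
            simp only [beq_eq_false_iff_ne]; omega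
          simp [hb]
      · rw [if_neg (by exact_mod_cast h1), if_neg (by simpa using h2)]
        rw [ih m acc hm]
        have hlt : numDigitsPort x d < m := by omega
        have heq : max m (max (numDigitsPort x d) (mxc d r)) = max m (mxc d r) := by omega
        rw [heq]
        have hb : (numDigitsPort x d == max m (mxc d r)) = false := by
          simp only [beq_eq_false_iff_ne]; omega
        rw [hb]
        by_cases hc : mxc d r ≤ m
        · rw [if_pos hc, if_pos (show max (numDigitsPort x d) (mxc d r) ≤ m by omega)]
          simp
        · rw [if_neg hc, if_neg (show ¬ max (numDigitsPort x d) (mxc d r) ≤ m by omega)]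
          simp

lemma foldl_max_map (d : Int) : ∀ (r : List Int) (a : Int), 0 ≤ a →
    (r.map (fun i => numDigitsPort i d)).foldl max a = max a (mxc d r) := by
  intro r
  induction r with
  | nil => intro a ha; simp [mxc]; omega
  | cons y t ih =>
    intro a ha
    simp only [List.map_cons, List.foldl_cons, mxc]
    rw [ih (max a (numDigitsPort y d)) (le_trans ha (le_max_left _ _))]
    omega

lemma bestB (d : Int) : ∀ numbers : List Int,
    (match PySem.List.max? (numbers.map (fun i => numDigitsPort i d)) (fun x => x) with
      | some m => m | none => 0) = mxc d numbers := by
  intro numbers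
  cases numbers with
  | nil => rfl
  | cons x r =>
    simp only [List.map_cons, PySem.List.max?_id_cons, mxc]
    exact foldl_max_map d r (numDigitsPort x d) (cnt_nonneg d x)

lemma zip_filter (d b : Int) : ∀ xs : List Int,
    ((xs.zip (xs.map (fun i => numDigitsPort i d))).filter (fun p => p.2 == b)).map Prod.fst
      = xs.filter (fun x => numDigitsPort x d == b) := by
  intro xs
  induction xs with
  | nil => simp
  | cons x r ih =>
    simp only [List.map_cons, List.zip_cons_cons, List.filter_cons]
    by_cases h : (numDigitsPort x d == b) = true
    · simp only [h, if_pos trivial]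
      simp [ih]
    · simp only [Bool.not_eq_true] at h
      simp [h, ih]

-- ===== VERDICT (by name: the statement is the Claim_ definition above) =====
theorem mFunction_spec : Claim_equal_mFunction := by
  intro d numbers _ _
  unfold Spec_mFunction mFunction
  have halt : mFunction_alt d numbers =
      ((numbers.zip (numbers.map (fun i => numDigitsPort i d))).filter
        (fun p => p.2 == (match PySem.List.max? (numbers.map (fun i => numDigitsPort i d)) (fun x => x) with
          | some m => m | none => 0))).map Prod.fst := rfl
  rw [halt, bestB d numbers, zip_filter d (mxc d numbers) numbers,
    loopA d numbers 0 [] (le_refl 0)]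
  have h0 : max 0 (mxc d numbers) = mxc d numbers := by
    have := mxc_nonneg d numbers; omega
  rw [h0]
  split <;> simp
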